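-- pv_equiv track=rewrite | github.com/OpenedClosed/Algorithms | algorithms_recursion/Два велосипеда.py | expected_day
-- ===== SOURCE A (Python) =====
-- def expected_day(saving, price, left, right):
--     if right <= left:
--         return -1
--
--     mid = (left + right) // 2
--
--     if int(saving[mid]) >= price and int(saving[mid-1]) < price:
--         return mid + 1
--
--     if right - left == 1:
--         if int(saving[mid]) >= price:
--             return mid + 1
--         elif int(saving[mid]) == price:
--             return mid + 1
--         elif int(saving[right]) >= price:
--             return right + 1
--         else:
--             return -1
--
--     if price <= int(saving[mid]):
--         return expected_day(saving, price, left, mid)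
--     else:
--         return expected_day(saving, price, mid, right)
-- ===== SOURCE B (Python) =====
-- def expected_day(saving, price, left, right):
--     while left < right:
--         mid = (left + right) // 2
--         if int(saving[mid]) >= price and int(saving[mid - 1]) < price:
--             return mid + 1
--         if right - left == 1:
--             if int(saving[mid]) >= price:
--                 return mid + 1
--             elif int(saving[mid]) == price:
--                 return mid + 1
--             elif int(saving[right]) >= price:
--                 return right + 1
--             else:
--                 return -1
--         if price <= int(saving[mid]):
--             right = mid
--         else:
--             left = mid
--     return -1
-- ===== Notes on version B (the rewrite author's own statement) =====
-- stated objective: simpler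
-- what changed: The tail recursion on (left, right) is replaced by an iterative while-loop that narrows the same window in place, removing the recursive calls and call-stack usage.
-- outside the precondition, e.g. on expected_day(['x', '5', '9'], 6, 1, 2): A returns 3, B returns 3
import Mathlib
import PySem

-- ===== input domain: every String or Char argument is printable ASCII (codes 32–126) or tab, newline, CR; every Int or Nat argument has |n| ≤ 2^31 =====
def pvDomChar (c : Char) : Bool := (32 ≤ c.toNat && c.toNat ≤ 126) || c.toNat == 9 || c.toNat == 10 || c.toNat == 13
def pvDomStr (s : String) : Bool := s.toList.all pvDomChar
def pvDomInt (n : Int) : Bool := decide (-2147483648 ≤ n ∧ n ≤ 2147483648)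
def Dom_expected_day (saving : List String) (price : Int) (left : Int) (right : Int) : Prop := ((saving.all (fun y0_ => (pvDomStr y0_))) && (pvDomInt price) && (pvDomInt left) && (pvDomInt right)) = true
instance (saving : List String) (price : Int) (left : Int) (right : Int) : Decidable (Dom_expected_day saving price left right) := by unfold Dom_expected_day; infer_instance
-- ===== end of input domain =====

-- B rewrites A's tail recursion as an iterative while-loop over the same (left, right) window; return value only, no side effects.

-- shared helper: int(saving[i]) with Python indexing; 0 is never observed under Pre_
def pvGetInt (saving : List String) (i : Int) : Int :=
  ((PySem.List.pyGet? saving i).bind PySem.Int.ofStr?).getD 0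

-- ===== PORT A =====
def expected_day (saving : List String) (price : Int) (left : Int) (right : Int) : Int :=
  if right ≤ left then -1
  else
    let mid := PySem.Int.floordiv (left + right) 2
    if pvGetInt saving mid ≥ price ∧ pvGetInt saving (mid - 1) < price then mid + 1
    else if right - left = 1 then
      if pvGetInt saving mid ≥ price then mid + 1
      else if pvGetInt saving mid = price then mid + 1
      else if pvGetInt saving right ≥ price then right + 1
      else -1
    else if price ≤ pvGetInt saving mid then expected_day saving price left mid
    else expected_day saving price mid right
termination_by (right - left).toNat
decreasing_by
  all_goals
    simp only [mid, PySem.Int.floordiv_eq_ediv_of_pos (a := left + right) (by omega : (0:Int) < 2)] at *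
    omega

-- ===== PORT B =====
-- the while-loop of Source B: one fuel tick per iteration; fuel is never exhausted before the loop exits
def pvLoop (saving : List String) (price : Int) : Nat → Int → Int → Int
  | 0, _, _ => -1
  | fuel + 1, left, right =>
    if left < right then
      let mid := PySem.Int.floordiv (left + right) 2
      if pvGetInt saving mid ≥ price ∧ pvGetInt saving (mid - 1) < price then mid + 1
      else if right - left = 1 then
        if pvGetInt saving mid ≥ price then mid + 1
        else if pvGetInt saving mid = price then mid + 1
        else if pvGetInt saving right ≥ price then right + 1
        else -1
      else if price ≤ pvGetInt saving mid then pvLoop saving price fuel left mid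
      else pvLoop saving price fuel mid right
    else -1

def expected_day_alt (saving : List String) (price : Int) (left : Int) (right : Int) : Int :=
  pvLoop saving price ((right - left).toNat + 1) left right

-- ===== PRECONDITION & SPEC =====
-- Pre_ excludes inputs on which A raises (an element that int() cannot parse, or an index
-- outside Python's valid range); the simple closed form over-excludes some returning inputs
-- whose unparseable elements are never actually indexed.
def Pre_expected_day (saving : List String) (price : Int) (left : Int) (right : Int) : Prop :=
  right ≤ left ∨
    ((∀ s ∈ saving, (PySem.Int.ofStr? s).isSome) ∧
      1 - (saving.length : Int) ≤ left ∧ right < saving.length)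
instance (saving : List String) (price : Int) (left : Int) (right : Int) : Decidable (Pre_expected_day saving price left right) := by unfold Pre_expected_day; infer_instance

def pvWitness_expected_day : List String × Int × Int × Int := (["1", "3", "7", "9"], 5, 0, 3)

def Spec_expected_day (saving : List String) (price : Int) (left : Int) (right : Int) (out : Int) : Prop := out = expected_day_alt saving price left right
instance (saving : List String) (price : Int) (left : Int) (right : Int) (out : Int) : Decidable (Spec_expected_day saving price left right out) := by unfold Spec_expected_day; infer_instance

-- ===== CLAIM (what is proved, stated in full; the proofs are below) =====
def Claim_equal_expected_day : Prop := ∀ (saving : List String) (price : Int) (left : Int) (right : Int), Dom_expected_day saving price left right → Pre_expected_day saving price left right → Spec_expected_day saving price left right (expected_day saving price left right)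

-- ===== LEMMAS AND PROOFS =====

-- the loop computes A's recursion whenever the fuel dominates the window width
theorem pvLoop_eq_expected_day (saving : List String) (price : Int) :
    ∀ (fuel : Nat) (left right : Int), (right - left).toNat < fuel →
      pvLoop saving price fuel left right = expected_day saving price left right := by
  intro fuel
  induction fuel with
  | zero => intro left right h; omega
  | succ n ih =>
    intro left right h
    rw [expected_day, pvLoop]
    by_cases hlr : left < right
    · have hlr' : ¬ right ≤ left := by omega
      simp only [hlr, if_true, hlr', if_false]
      have hmid := PySem.Int.floordiv_eq_ediv_of_pos (a := left + right) (by omega : (0:Int) < 2)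
      split_ifs with h1 h2 h3 <;> try rfl
      · exact ih left (PySem.Int.floordiv (left + right) 2) (by rw [hmid] at *; omega)
      · exact ih (PySem.Int.floordiv (left + right) 2) right (by rw [hmid] at *; omega)
    · have : right ≤ left := by omega
      simp [hlr, this]

-- ===== VERDICT (by name: the statement is the Claim_ definition above) =====
theorem expected_day_spec : Claim_equal_expected_day := by
  intro saving price left right _ _
  unfold Spec_expected_day expected_day_alt
  rw [pvLoop_eq_expected_day saving price ((right - left).toNat + 1) left right (by omega)]
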